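-- pv_equiv track=rewrite | github.com/get-hunter/hero365-app | backend/app/domain/services/website_builder_domain_service.py | _is_valid_subdomain
-- ===== SOURCE A (Python) =====
-- def _is_valid_subdomain(subdomain: str) -> bool:
--     """Validate subdomain format."""
--
--     if not subdomain:
--         return False
--
--     # Basic validation rules
--     if len(subdomain) < 3 or len(subdomain) > 50:
--         return False
--
--     # Must start and end with alphanumeric
--     if not subdomain[0].isalnum() or not subdomain[-1].isalnum():
--         return False
--
--     # Only alphanumeric and hyphens
--     if not all(c.isalnum() or c == '-' for c in subdomain):
--         return False
--
--     # No consecutive hyphens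
--     if '--' in subdomain:
--         return False
--
--     return True
-- ===== SOURCE B (Python) =====
-- def _is_valid_subdomain(subdomain: str) -> bool:
--     """Validate subdomain format: single pass with a prev-hyphen flag."""
--     n = len(subdomain)
--     if n < 3 or n > 50:
--         return False
--     if not subdomain[0].isalnum() or not subdomain[-1].isalnum():
--         return False
--     prev_hyphen = False
--     for c in subdomain:
--         if c == '-':
--             if prev_hyphen:
--                 return False
--             prev_hyphen = True
--         elif c.isalnum():
--             prev_hyphen = False
--         else:
--             return False
--     return True
-- ===== Notes on version B (the rewrite author's own statement) =====
-- stated objective: simpler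
-- what changed: Replaced A's separate scans (emptiness check, all() character scan, and a substring search for a double hyphen) by one left-to-right pass with a prev-hyphen flag; the empty check is subsumed by the length guard.
import Mathlib
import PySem

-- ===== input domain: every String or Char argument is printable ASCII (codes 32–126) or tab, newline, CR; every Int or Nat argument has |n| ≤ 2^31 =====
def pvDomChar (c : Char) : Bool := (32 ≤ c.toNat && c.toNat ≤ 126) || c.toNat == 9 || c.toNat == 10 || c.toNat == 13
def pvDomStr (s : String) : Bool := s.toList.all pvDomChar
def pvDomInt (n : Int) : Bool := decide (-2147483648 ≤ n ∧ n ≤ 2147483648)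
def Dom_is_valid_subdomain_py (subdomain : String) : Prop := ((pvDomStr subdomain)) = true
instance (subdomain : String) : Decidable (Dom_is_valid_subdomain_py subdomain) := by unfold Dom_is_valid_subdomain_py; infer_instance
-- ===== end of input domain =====

-- B is one left-to-right pass with a prev-hyphen flag instead of A's separate scans (all() and '--' search); simpler.
-- ===== PORT A =====
def is_valid_subdomain_py (subdomain : String) : Bool :=
  if subdomain.toList.isEmpty then false
  else if PySem.Str.len subdomain < 3 || PySem.Str.len subdomain > 50 then false
  else
    match PySem.Str.pyGet? subdomain 0, PySem.Str.pyGet? subdomain (-1) with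
    | some c0, some cl =>
      if !(PySem.Chars.isalnum c0) || !(PySem.Chars.isalnum cl) then false
      else if !(subdomain.toList.all (fun c => PySem.Chars.isalnum c || c == '-')) then false
      else if PySem.Str.isIn "--" subdomain then false
      else true
    | _, _ => false  -- unreachable: the string is nonempty here

-- ===== PORT B =====
-- the for-loop of Source B: prev = prev_hyphen flag; early returns become results
def altLoop : List Char → Bool → Bool
  | [], _ => true
  | c :: rest, prev =>
    if c == '-' then
      if prev then false else altLoop rest true
    else if PySem.Chars.isalnum c then altLoop rest false
    else false

def is_valid_subdomain_py_alt (subdomain : String) : Bool :=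
  if PySem.Str.len subdomain < 3 || PySem.Str.len subdomain > 50 then false
  else
    match PySem.Str.pyGet? subdomain 0 with
    | none => false  -- unreachable: length ≥ 3 here
    | some c0 =>
      match PySem.Str.pyGet? subdomain (-1) with
      | none => false  -- unreachable: length ≥ 3 here
      | some cl =>
        if !(PySem.Chars.isalnum c0) || !(PySem.Chars.isalnum cl) then false
        else altLoop subdomain.toList false

-- ===== PRECONDITION & SPEC =====
def Spec_is_valid_subdomain_py (subdomain : String) (out : Bool) : Prop := out = is_valid_subdomain_py_alt subdomain
instance (subdomain : String) (out : Bool) : Decidable (Spec_is_valid_subdomain_py subdomain out) := by unfold Spec_is_valid_subdomain_py; infer_instance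

-- ===== CLAIM (what is proved, stated in full; the proofs are below) =====
def Claim_equal_is_valid_subdomain_py : Prop := ∀ (subdomain : String), Dom_is_valid_subdomain_py subdomain → Spec_is_valid_subdomain_py subdomain (is_valid_subdomain_py subdomain)

-- ===== LEMMAS AND PROOFS =====

-- characterisation of Source B's loop: all chars admissible, no '--' infix, and no hyphen right after a pending one
theorem altLoop_eq (l : List Char) (prev : Bool) :
    altLoop l prev =
      (l.all (fun c => PySem.Chars.isalnum c || c == '-')
        && !decide ((['-', '-'] : List Char) <:+: l)
        && !(prev && (l.head? == some '-'))) := by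
  induction l generalizing prev with
  | nil => simp [altLoop]
  | cons c rest ih =>
    by_cases hc : c = '-'
    · subst hc
      cases prev with
      | true => simp [altLoop, List.infix_cons_iff]
      | false =>
        rw [altLoop, ih]
        have hpre : ((['-', '-'] : List Char) <+: ('-' :: rest)) ↔ rest.head? = some '-' := by
          cases rest with
          | nil => simp [List.cons_prefix_cons]
          | cons d t => simp [List.cons_prefix_cons, eq_comm]
        simp [List.infix_cons_iff, hpre]
        by_cases hh : rest.head? = some '-' <;> simp [hh]
    · have hpre : ¬ ((['-', '-'] : List Char) <+: (c :: rest)) := by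
        intro h; exact hc ((List.cons_prefix_cons.mp h).1).symm
      have hcb : (c == '-') = false := by simp [hc]
      by_cases ha : PySem.Chars.isalnum c = true
      · simp [altLoop, hcb, ha, List.infix_cons_iff, hpre, ih]
      · simp [altLoop, hcb, ha]

theorem ab_eq (s : String) : is_valid_subdomain_py s = is_valid_subdomain_py_alt s := by
  unfold is_valid_subdomain_py is_valid_subdomain_py_alt
  by_cases he : s.toList.isEmpty
  · have h0 : s.length = 0 := by
      have := congrArg List.length (List.isEmpty_iff.mp he)
      simpa using this
    simp [he, PySem.Str.len_eq, h0]
  · rw [if_neg he]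
    by_cases hg : (decide (PySem.Str.len s < 3) || decide (PySem.Str.len s > 50)) = true
    · rw [if_pos hg, if_pos hg]
    · rw [if_neg hg, if_neg hg]
      cases h0 : PySem.Str.pyGet? s 0 <;> cases h1 : PySem.Str.pyGet? s (-1) <;> try rfl
      rename_i c0 cl
      dsimp only
      by_cases hends : (!(PySem.Chars.isalnum c0) || !(PySem.Chars.isalnum cl)) = true
      · rw [if_pos hends, if_pos hends]
      · rw [if_neg hends, if_neg hends]
        rw [altLoop_eq]
        by_cases hinf : (['-', '-'] : List Char) <:+: s.toList
        · have hin : PySem.Str.isIn "--" s = true :=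
            (PySem.Str.isIn_iff_infix "--" s).mpr (by simpa using hinf)
          rw [hin]
          simp [hinf]
        · have hin : PySem.Str.isIn "--" s = false := by
            rw [← Bool.not_eq_true]
            intro h
            exact hinf (by simpa using (PySem.Str.isIn_iff_infix "--" s).mp h)
          rw [hin]
          by_cases hall : (s.toList.all fun c => PySem.Chars.isalnum c || c == '-') = true <;>
            simp [hall, hinf]

-- ===== VERDICT (by name: the statement is the Claim_ definition above) =====
theorem is_valid_subdomain_py_spec : Claim_equal_is_valid_subdomain_py := by
  intro s _
  exact ab_eq s
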